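-- pv_equiv track=rewrite | github.com/TheSchwa1337/Schwabot_Base_Files | tools/final_mathematical_framework_fixer.py | _break_comma_list
-- ===== SOURCE A (Python) =====
-- def _break_comma_list(line: str) -> str:
--     """Break comma-separated lists across multiple lines"""
--     if ',' in line and len(line) > 120:
--         parts = line.split(',')
--         if len(parts) > 2:
--             # Find a good breaking point
--             for i in range(1, len(parts)):
--                 first_part = ','.join(parts[:i]) + ','
--                 second_part = ','.join(parts[i:])
--
--                 if len(first_part) < 100 and len(second_part) < 100:
--                     return f"{first_part}\n    {second_part}"
--
--     return line
-- ===== SOURCE B (Python) =====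
-- def _break_comma_list(line: str) -> str:
--     """Break comma-separated lists across multiple lines (single-pass length arithmetic)."""
--     if ',' in line and len(line) > 120:
--         parts = line.split(',')
--         n = len(parts)
--         if n > 2:
--             total = sum(len(p) for p in parts)
--             first_len = 0
--             for i in range(1, n):
--                 first_len += len(parts[i - 1])
--                 # first piece = i parts + (i-1) commas + trailing comma = first_len + i
--                 # second piece = remaining chars + (n-i-1) commas
--                 if first_len + i < 100 and total - first_len + (n - i - 1) < 100:
--                     return ','.join(parts[:i]) + ',\n    ' + ','.join(parts[i:])
--     return line
-- ===== Notes on version B (the rewrite author's own statement) =====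
-- stated objective: faster
-- what changed: A re-joins both halves of the comma list at every candidate index (quadratic in line length); B keeps one running prefix-length accumulator, tests the two <100 conditions arithmetically, and performs a single pair of joins only at the found break index.
import Mathlib
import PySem

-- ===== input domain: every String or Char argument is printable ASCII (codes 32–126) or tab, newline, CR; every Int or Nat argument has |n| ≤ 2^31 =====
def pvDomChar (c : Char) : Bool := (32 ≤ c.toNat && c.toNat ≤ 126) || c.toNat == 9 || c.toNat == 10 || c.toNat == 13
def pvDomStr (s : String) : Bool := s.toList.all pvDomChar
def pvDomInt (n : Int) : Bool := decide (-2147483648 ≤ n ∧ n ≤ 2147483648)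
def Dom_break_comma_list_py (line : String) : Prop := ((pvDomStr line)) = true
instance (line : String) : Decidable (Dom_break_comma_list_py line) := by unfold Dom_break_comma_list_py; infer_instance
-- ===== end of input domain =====

-- B replaces A's per-index pair of joins by one running length accumulator and a single
-- final pair of joins at the found break index; objective: faster (fewer joins; not timed here).

-- ===== PORT A =====
-- A's 'for i in range(1, len(parts))' loop, joining both sides at every index.
def aLoop (parts : List (List Char)) : List Int → Option (List Char)
  | [] => none
  | i :: rest =>
    let first := PySem.Chars.join [','] (PySem.List.slice parts none (some i)) ++ [',']
    let second := PySem.Chars.join [','] (PySem.List.slice parts (some i) none)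
    if first.length < 100 ∧ second.length < 100 then
      some (first ++ ('\n' :: ' ' :: ' ' :: ' ' :: ' ' :: []) ++ second)
    else aLoop parts rest

def break_comma_list_py (line : String) : String :=
  let cs := line.toList
  if PySem.Chars.isIn [','] cs ∧ 120 < cs.length then
    let parts := PySem.Chars.splitOn cs [',']
    if 2 < parts.length then
      match aLoop parts (PySem.List.pyRange 1 (parts.length : Int) 1) with
      | some out => String.ofList out
      | none => line
    else line
  else line

-- ===== PORT B =====
-- B's loop 'for i in range(1, n): first_len += len(parts[i-1]); …' walks parts[:-1]
-- with the running first_len accumulator; only the found index is joined.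
def bLoop (total n : Nat) : List (List Char) → Nat → Nat → Option Nat
  | [], _, _ => none
  | p :: rest, i, firstLen =>
    let fl := firstLen + p.length
    if fl + i < 100 ∧ total - fl + (n - i - 1) < 100 then some i
    else bLoop total n rest (i + 1) fl

def bBuild (parts : List (List Char)) (i : Nat) : List Char :=
  PySem.Chars.join [','] (parts.take i)
    ++ (',' :: '\n' :: ' ' :: ' ' :: ' ' :: ' ' :: [])
    ++ PySem.Chars.join [','] (parts.drop i)

def break_comma_list_py_alt (line : String) : String :=
  let cs := line.toList
  if PySem.Chars.isIn [','] cs ∧ 120 < cs.length then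
    let parts := PySem.Chars.splitOn cs [',']
    let n := parts.length
    if 2 < n then
      let total := (parts.map List.length).sum
      match bLoop total n parts.dropLast 1 0 with
      | some i => String.ofList (bBuild parts i)
      | none => line
    else line
  else line

-- ===== PRECONDITION & SPEC =====
def Spec_break_comma_list_py (line : String) (out : String) : Prop := out = break_comma_list_py_alt line
instance (line : String) (out : String) : Decidable (Spec_break_comma_list_py line out) := by unfold Spec_break_comma_list_py; infer_instance

-- ===== CLAIM (what is proved, stated in full; the proofs are below) =====
def Claim_equal_break_comma_list_py : Prop := ∀ (line : String), Dom_break_comma_list_py line → Spec_break_comma_list_py line (break_comma_list_py line)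

-- ===== LEMMAS AND PROOFS =====

-- length of ','.join(l) for nonempty l: the part lengths plus one comma between parts
lemma join_comma_length (l : List (List Char)) (h : l ≠ []) :
    (PySem.Chars.join [','] l).length = (l.map List.length).sum + (l.length - 1) := by
  induction l with
  | nil => simp at h
  | cons a t ih =>
    cases t with
    | nil => simp [PySem.Chars.join_singleton]
    | cons b t' =>
      rw [PySem.Chars.join_cons_cons]
      simp only [List.length_append, List.map_cons, List.sum_cons, List.length_cons,
        ih (by simp)]
      simp
      omega

-- the two loops agree, index for index
lemma loopEq (parts : List (List Char)) :
    ∀ (k i : Nat), 1 ≤ i → i + k = parts.length →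
    aLoop parts (PySem.List.pyRange (i : Int) (parts.length : Int) 1) =
      (bLoop ((parts.map List.length).sum) parts.length (parts.dropLast.drop (i - 1)) i
        (((parts.take (i - 1)).map List.length).sum)).map (bBuild parts) := by
  intro k
  induction k with
  | zero =>
    intro i h1 h2
    rw [PySem.List.pyRange_one_eq_nil (by omega)]
    rw [List.drop_eq_nil_of_le (by simp [List.length_dropLast]; omega)]
    simp [aLoop, bLoop]
  | succ k ih =>
    intro i h1 h2
    have hin : i < parts.length := by omega
    have hi1 : i - 1 < parts.length - 1 := by omega
    rw [PySem.List.pyRange_one_cons (by exact_mod_cast hin)]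
    have hd : parts.dropLast.drop (i - 1) = parts[i - 1] :: parts.dropLast.drop i := by
      rw [List.drop_eq_getElem_cons (by simpa [List.length_dropLast] using hi1)]
      have h11 : i - 1 + 1 = i := by omega
      rw [h11, List.getElem_dropLast]
    rw [hd]
    simp only [aLoop, bLoop]
    -- first-part length
    have hfl : ((parts.take i).map List.length).sum
        = ((parts.take (i - 1)).map List.length).sum + parts[i - 1].length := by
      rw [List.map_take, List.map_take]
      conv_lhs => rw [show i = (i - 1) + 1 by omega]
      rw [List.sum_take_succ _ _ (by simp; omega), List.getElem_map]
    have htake : PySem.List.slice parts none (some (i : Int)) = parts.take i := by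
      rw [PySem.List.slice_to parts (Int.natCast_nonneg i)]; simp
    have hdrop : PySem.List.slice parts (some (i : Int)) none = parts.drop i := by
      rw [PySem.List.slice_from parts (Int.natCast_nonneg i)]; simp
    have hlen1 : (PySem.Chars.join [','] (parts.take i) ++ [',']).length
        = ((parts.take i).map List.length).sum + i := by
      rw [List.length_append,
        join_comma_length _ (by
          apply List.ne_nil_of_length_pos
          simp [List.length_take]; omega)]
      simp [List.length_take]
      omega
    have hlen2 : (PySem.Chars.join [','] (parts.drop i)).length
        = ((parts.drop i).map List.length).sum + (parts.length - i - 1) := by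
      rw [join_comma_length _ (by
        apply List.ne_nil_of_length_pos
        simp [List.length_drop]; omega)]
      simp [List.length_drop]
    have htot : (parts.map List.length).sum
        = ((parts.take i).map List.length).sum + ((parts.drop i).map List.length).sum := by
      conv_lhs => rw [← List.take_append_drop i parts]
      simp
    rw [htake, hdrop]
    rw [apply_ite (Option.map (bBuild parts))]
    refine if_congr ?_ ?_ ?_
    · constructor
      · rintro ⟨c1, c2⟩
        constructor
        · rw [hlen1] at c1; omega
        · rw [hlen2] at c2; omega
      · rintro ⟨c1, c2⟩
        constructor
        · rw [hlen1]; omega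
        · rw [hlen2]; omega
    · simp [bBuild, List.append_assoc]
    · have := ih (i + 1) (by omega) (by omega)
      rw [show ((i : Int) + 1) = ((i + 1 : Nat) : Int) by push_cast; ring, this]
      have h1' : i + 1 - 1 = i := by omega
      rw [h1']
      rw [show ((parts.take i).map List.length).sum
          = ((parts.take (i - 1)).map List.length).sum + parts[i - 1].length from hfl]

-- ===== VERDICT (by name: the statement is the Claim_ definition above) =====
theorem break_comma_list_py_spec : Claim_equal_break_comma_list_py := by
  intro line _
  unfold Spec_break_comma_list_py break_comma_list_py break_comma_list_py_alt
  simp only []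
  split_ifs with h1 h2
  · set parts := PySem.Chars.splitOn line.toList [','] with hp
    have := loopEq parts (parts.length - 1) 1 (le_refl 1) (by omega)
    have h0 : (1:Nat) - 1 = 0 := rfl
    rw [h0, List.drop_zero, List.take_zero] at this
    simp only [List.map_nil, List.sum_nil, Nat.cast_one] at this
    rw [this]
    cases bLoop ((parts.map List.length).sum) parts.length parts.dropLast 1 0 with
    | none => rfl
    | some i => rfl
  · rfl
  · rfl
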